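-- pv_equiv track=rewrite | github.com/bolkur1-rpi/TextAnalyzer | html/py/parser.py | uniqueWordAmount
-- ===== SOURCE A (Python) =====
-- def uniqueWordAmount(words):
--     unique = []
--     duplicate = []
--
--     for word in words:
--         word = word.lower()
--         if word not in unique and word not in duplicate:
--             unique.append(word)
--         elif word in unique:
--             unique.remove(word)
--             duplicate.append(word)
--     unique.sort()
--     return unique
-- ===== SOURCE B (Python) =====
-- def uniqueWordAmount(words):
--     lowered = sorted(w.lower() for w in words)
--     result = []
--     prev = None
--     run = 0
--     for w in lowered:
--         if w == prev:
--             run += 1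
--         else:
--             if run == 1:
--                 result.append(prev)
--             prev = w
--             run = 1
--     if run == 1:
--         result.append(prev)
--     return result
-- ===== Notes on version B (the rewrite author's own statement) =====
-- stated objective: faster
-- what changed: A keeps an O(n)-membership 'unique'/'duplicate' pair of lists (with list.remove) and sorts at the end; B lowercases, sorts once, and emits count-1 words in a single run-length scan over the sorted list.
import Mathlib
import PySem

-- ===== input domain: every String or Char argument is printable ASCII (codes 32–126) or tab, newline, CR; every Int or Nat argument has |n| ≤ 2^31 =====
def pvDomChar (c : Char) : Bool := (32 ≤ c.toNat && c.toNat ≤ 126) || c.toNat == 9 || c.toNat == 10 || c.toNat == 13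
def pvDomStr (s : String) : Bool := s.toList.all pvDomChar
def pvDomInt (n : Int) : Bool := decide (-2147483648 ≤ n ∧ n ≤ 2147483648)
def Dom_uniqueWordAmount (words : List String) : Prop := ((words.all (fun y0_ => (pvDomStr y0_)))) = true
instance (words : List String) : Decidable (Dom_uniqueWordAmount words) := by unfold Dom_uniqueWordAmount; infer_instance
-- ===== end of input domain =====

-- B replaces A's quadratic membership/remove bookkeeping by sort-then-run-length scan; objective: faster.

-- ===== PORT A =====
-- loop body of A: w = word.lower(); membership tests on 'unique'/'duplicate'; unique.remove(w) only
-- fires with w ∈ unique, so remove? is some there and getD is exact.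
def stepA (st : List String × List String) (word : String) : List String × List String :=
  let w := PySem.Str.lower word
  if w ∉ st.1 ∧ w ∉ st.2 then (st.1 ++ [w], st.2)
  else if w ∈ st.1 then ((PySem.List.remove? st.1 w).getD st.1, st.2 ++ [w])
  else st

def uniqueWordAmount (words : List String) : List String :=
  let st := words.foldl stepA ([], [])
  PySem.List.sorted st.1 (fun x => x) false

-- ===== PORT B =====
-- loop body of B: state (result, prev, run); Python's 'prev = None' is 'none', and 'w == prev'
-- with prev = None is False, i.e. 'some w = none' is False.
def stepB (st : List String × Option String × Int) (w : String) : List String × Option String × Int :=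
  if some w = st.2.1 then (st.1, st.2.1, st.2.2 + 1)
  else ((if st.2.2 = 1 then st.1 ++ [st.2.1.getD ""] else st.1), some w, 1)

def uniqueWordAmount_alt (words : List String) : List String :=
  let lowered := PySem.List.sorted (words.map PySem.Str.lower) (fun x => x) false
  let st := lowered.foldl stepB ([], none, 0)
  if st.2.2 = 1 then st.1 ++ [st.2.1.getD ""] else st.1

-- ===== PRECONDITION & SPEC =====
def Spec_uniqueWordAmount (words : List String) (out : List String) : Prop := out = uniqueWordAmount_alt words
instance (words : List String) (out : List String) : Decidable (Spec_uniqueWordAmount words out) := by unfold Spec_uniqueWordAmount; infer_instance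

-- ===== CLAIM (what is proved, stated in full; the proofs are below) =====
def Claim_equal_uniqueWordAmount : Prop := ∀ (words : List String), Dom_uniqueWordAmount words → Spec_uniqueWordAmount words (uniqueWordAmount words)

-- ===== LEMMAS AND PROOFS =====

-- the loop of A over already-lowered words
lemma foldl_stepA_map (words : List String) (st : List String × List String) :
    words.foldl stepA st = (words.map PySem.Str.lower).foldl
      (fun st w => if w ∉ st.1 ∧ w ∉ st.2 then (st.1 ++ [w], st.2)
        else if w ∈ st.1 then ((PySem.List.remove? st.1 w).getD st.1, st.2 ++ [w])
        else st) st := by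
  rw [List.foldl_map]; rfl

-- invariant of A's loop: 'unique' is the first-occurrence list restricted to count-1 elements,
-- 'duplicate' holds exactly the elements seen at least twice
lemma A_inv : ∀ (s : List String) (u d p : List String),
    u = (PySem.Set.ofList p).filter (fun x => p.count x == 1) →
    (∀ x, x ∈ d ↔ 2 ≤ p.count x) →
    (s.foldl (fun st w => if w ∉ st.1 ∧ w ∉ st.2 then (st.1 ++ [w], st.2)
        else if w ∈ st.1 then ((PySem.List.remove? st.1 w).getD st.1, st.2 ++ [w])
        else st) (u, d)).1
      = (PySem.Set.ofList (p ++ s)).filter (fun x => (p ++ s).count x == 1) := by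
  intro s
  induction s with
  | nil => intro u d p hu hd; simpa using hu
  | cons w s' ih =>
    intro u d p hu hd
    have hmemu : w ∈ u ↔ p.count w = 1 := by
      subst hu
      constructor
      · intro h
        simpa using (List.of_mem_filter h)
      · intro h
        refine List.mem_filter.mpr ⟨?_, by simpa using h⟩
        exact (PySem.Set.mem_ofList p w).mpr (List.count_pos_iff.mp (by omega))
    have key : ∀ x, x ∈ PySem.Set.ofList p → x ≠ w →
        ((p ++ [w]).count x == 1) = (p.count x == 1) := by
      intro x _ hne
      simp [List.count_append, Ne.symm hne]
    rw [List.foldl_cons]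
    have hstep : ∃ u' d',
        (if w ∉ u ∧ w ∉ d then (u ++ [w], d)
          else if w ∈ u then ((PySem.List.remove? u w).getD u, d ++ [w]) else (u, d)) = (u', d') ∧
        u' = (PySem.Set.ofList (p ++ [w])).filter (fun x => (p ++ [w]).count x == 1) ∧
        (∀ x, x ∈ d' ↔ 2 ≤ (p ++ [w]).count x) := by
      by_cases h0 : p.count w = 0
      · -- w unseen: appended to unique
        have hwp : w ∉ p := by
          intro h; exact absurd (List.count_pos_iff.mpr h) (by omega)
        have hwu : w ∉ u := by rw [hmemu]; omega
        have hwd : w ∉ d := by rw [hd]; omega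
        refine ⟨u ++ [w], d, by rw [if_pos ⟨hwu, hwd⟩], ?_, ?_⟩
        · have hset : PySem.Set.ofList (p ++ [w]) = PySem.Set.ofList p ++ [w] := by
            rw [PySem.Set.ofList_append_singleton]; unfold PySem.Set.add; rw [if_neg]
            simpa [List.contains_iff_mem, PySem.Set.mem_ofList] using hwp
          rw [hset, List.filter_append, List.filter_congr
            (fun x hx => key x hx (by rintro rfl; exact hwp ((PySem.Set.mem_ofList p x).mp hx))), ← hu]
          simp [List.count_append, h0]
        · intro x
          rw [hd]
          by_cases hxw : x = w
          · subst hxw; simp [List.count_append, h0]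
          · simp [List.count_append, Ne.symm hxw]
      · have hwps : w ∈ PySem.Set.ofList p :=
          (PySem.Set.mem_ofList p w).mpr (List.count_pos_iff.mp (by omega))
        have hset : PySem.Set.ofList (p ++ [w]) = PySem.Set.ofList p := by
          rw [PySem.Set.ofList_append_singleton]; unfold PySem.Set.add; rw [if_pos]
          simpa [List.contains_iff_mem] using hwps
        by_cases h1 : p.count w = 1
        · -- second occurrence: moved from unique to duplicate
          have hwu : w ∈ u := hmemu.mpr h1
          have huN : u.Nodup := hu ▸ (PySem.Set.nodup_ofList p).filter _
          refine ⟨u.erase w, d ++ [w], ?_, ?_, ?_⟩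
          · rw [if_neg (by simp [hwu]), if_pos hwu,
              PySem.List.remove?_eq_some_erase u w hwu, Option.getD_some]
          · rw [huN.erase_eq_filter w, hu, List.filter_filter, hset]
            refine List.filter_congr ?_
            intro x hx
            by_cases hxw : x = w
            · subst hxw; simp [List.count_append, h1]
            · simp [List.count_append, Ne.symm hxw, hxw]
          · intro x
            by_cases hxw : x = w
            · subst hxw; simp [List.count_append, h1]
            · simp only [List.mem_append, List.mem_singleton, hxw, or_false, hd x,
                List.count_append]
              simp [Ne.symm hxw]
        · -- already duplicated: nothing changes
          have h2c : 2 ≤ p.count w := by omega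
          have hwd : w ∈ d := (hd w).mpr h2c
          have hwu : w ∉ u := by rw [hmemu]; omega
          refine ⟨u, d, by rw [if_neg (by simp [hwd]), if_neg hwu], ?_, ?_⟩
          · rw [hu, hset]
            refine List.filter_congr ?_
            intro x hx
            by_cases hxw : x = w
            · subst hxw
              have hne1 : ¬ List.count x p = 1 := by omega
              have hne1' : ¬ List.count x p + 1 = 1 := by omega
              simp [List.count_append, hne1, h0]
            · simp [List.count_append, Ne.symm hxw]
          · intro x
            rw [hd]
            by_cases hxw : x = w
            · subst hxw; simp [List.count_append]
              exact iff_of_true h2c (List.count_pos_iff.mp (by omega))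
            · simp [List.count_append, Ne.symm hxw]
    obtain ⟨u', d', hpair, h1', h2'⟩ := hstep
    simp only []
    rw [hpair]
    have := ih u' d' (p ++ [w]) h1' h2'
    simpa [List.append_assoc] using this

-- B's scan, started after the first element of a run: flush semantics
lemma scan_go : ∀ (s : List String) (res : List String) (v : String) (k : Int),
    1 ≤ k → (∀ x ∈ s, v ≤ x) → s.Pairwise (· ≤ ·) →
    (if (s.foldl stepB (res, some v, k)).2.2 = 1
      then (s.foldl stepB (res, some v, k)).1 ++ [(s.foldl stepB (res, some v, k)).2.1.getD ""]
      else (s.foldl stepB (res, some v, k)).1)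
      = res ++ (if k + (s.count v : Int) = 1 then [v] else [])
          ++ s.filter (fun x => decide (v < x) && (s.count x == 1)) := by
  intro s
  induction s with
  | nil =>
    intro res v k _ _ _
    by_cases hk : k = 1 <;> simp [hk]
  | cons w s' ih =>
    intro res v k hk hall hpair
    have hvw : v ≤ w := hall w (by simp)
    have hall' : ∀ x ∈ s', w ≤ x := fun x hx => (List.pairwise_cons.mp hpair).1 x hx
    have hpair' : s'.Pairwise (· ≤ ·) := (List.pairwise_cons.mp hpair).2
    rw [List.foldl_cons]
    by_cases hw : w = v
    · -- run continues
      subst hw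
      have hstep : stepB (res, some w, k) w = (res, some w, k + 1) := by
        simp [stepB]
      rw [hstep, ih res w (k + 1) (by omega) hall' hpair']
      have hcnt : (w :: s').count w = s'.count w + 1 := by simp
      have hcond : (k + 1 + (s'.count w : Int) = 1) ↔ (k + ((w :: s').count w : Int) = 1) := by
        rw [hcnt]; push_cast; omega
      have hhead : (w :: s').filter (fun x => decide (w < x) && ((w :: s').count x == 1))
          = s'.filter (fun x => decide (w < x) && ((w :: s').count x == 1)) :=
        List.filter_cons_of_neg (by simp)
      have hfilt : (w :: s').filter (fun x => decide (w < x) && ((w :: s').count x == 1))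
          = s'.filter (fun x => decide (w < x) && (s'.count x == 1)) := by
        rw [hhead]
        refine List.filter_congr ?_
        intro x hx
        by_cases hxv : x = w
        · rw [hxv]; simp
        · simp [Ne.symm hxv]
      rw [hfilt]
      simp only [hcond]
    · -- new run starts
      have hlt : v < w := lt_of_le_of_ne hvw (Ne.symm hw)
      have hstep : stepB (res, some v, k) w
          = ((if k = 1 then res ++ [v] else res), some w, 1) := by
        simp [stepB, hw]
      have hvnot : v ∉ w :: s' := by
        intro hmem
        rcases List.mem_cons.mp hmem with h | h
        · exact hw h.symm
        · exact absurd (hall' v h) (by exact not_le.mpr hlt)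
      have hcv : (w :: s').count v = 0 := List.count_eq_zero_of_not_mem hvnot
      rw [hstep, ih (if k = 1 then res ++ [v] else res) w 1 le_rfl hall' hpair']
      have hfilt : (w :: s').filter (fun x => decide (v < x) && ((w :: s').count x == 1))
          = (if 1 + (s'.count w : Int) = 1 then [w] else [])
            ++ s'.filter (fun x => decide (w < x) && (s'.count x == 1)) := by
        rw [List.filter_cons]
        have hpw : (decide (v < w) && ((w :: s').count w == 1))
            = decide (1 + (s'.count w : Int) = 1) := by
          have hc : (w :: s').count w = s'.count w + 1 := by simp
          rw [decide_eq_true hlt]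
          by_cases h0 : s'.count w = 0
          · simp [hc, h0]
          · have hi : ¬ (1 + (s'.count w : Int) = 1) := by omega
            simp [hc, h0, hi]
        rw [hpw]
        have htail : s'.filter (fun x => decide (v < x) && ((w :: s').count x == 1))
            = s'.filter (fun x => decide (w < x) && (s'.count x == 1)) := by
          refine List.filter_congr ?_
          intro x hx
          by_cases hxw : x = w
          · have hcx : (w :: s').count x = s'.count x + 1 := by rw [hxw]; simp
            have hpos : 0 < s'.count x := List.count_pos_iff.mpr hx
            have h2' : ((w :: s').count x == 1) = false := by
              rw [hcx]; simp only [beq_eq_false_iff_ne, ne_eq]; omega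
            have h3 : decide (w < x) = false := by rw [hxw]; simp
            rw [h2', h3]; simp
          · have hwx : w < x := lt_of_le_of_ne (hall' x hx) (Ne.symm hxw)
            rw [decide_eq_true hwx, decide_eq_true (lt_trans hlt hwx)]
            simp [Ne.symm hxw]
        rw [htail]
        split <;> simp_all
      rw [hfilt, hcv]
      by_cases hk1 : k = 1 <;> simp [hk1]

-- B's scan on a sorted list keeps exactly the count-1 elements, in order
lemma scan_top (s : List String) (h : s.Pairwise (· ≤ ·)) :
    (if (s.foldl stepB ([], none, 0)).2.2 = 1
      then (s.foldl stepB ([], none, 0)).1 ++ [(s.foldl stepB ([], none, 0)).2.1.getD ""]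
      else (s.foldl stepB ([], none, 0)).1)
      = s.filter (fun x => s.count x == 1) := by
  cases s with
  | nil => simp
  | cons w s' =>
    have hall' : ∀ x ∈ s', w ≤ x := fun x hx => (List.pairwise_cons.mp h).1 x hx
    have hpair' : s'.Pairwise (· ≤ ·) := (List.pairwise_cons.mp h).2
    rw [List.foldl_cons]
    have hstep : stepB ([], none, 0) w = ([], some w, 1) := by simp [stepB]
    rw [hstep, scan_go s' [] w 1 le_rfl hall' hpair']
    have hpw : ((w :: s').count w == 1) = decide (1 + (s'.count w : Int) = 1) := by
      have hc : (w :: s').count w = s'.count w + 1 := by simp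
      by_cases h0 : s'.count w = 0
      · simp [hc, h0]
      · have hi : ¬ (1 + (s'.count w : Int) = 1) := by omega
        simp [hc, h0, hi]
    have htail : s'.filter (fun x => ((w :: s').count x == 1))
        = s'.filter (fun x => decide (w < x) && (s'.count x == 1)) := by
      refine List.filter_congr ?_
      intro x hx
      by_cases hxw : x = w
      · have hcx : (w :: s').count x = s'.count x + 1 := by rw [hxw]; simp
        have hpos : 0 < s'.count x := List.count_pos_iff.mpr hx
        have h2' : ((w :: s').count x == 1) = false := by
          rw [hcx]; simp only [beq_eq_false_iff_ne, ne_eq]; omega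
        have h3 : decide (w < x) = false := by rw [hxw]; simp
        rw [h2', h3]; simp
      · have hwx : w < x := lt_of_le_of_ne (hall' x hx) (Ne.symm hxw)
        rw [decide_eq_true hwx]
        simp [Ne.symm hxw]
    rw [List.filter_cons, hpw, htail]
    by_cases hc1 : (1 + (s'.count w : Int) = 1) <;> simp [hc1]

-- ===== VERDICT (by name: the statement is the Claim_ definition above) =====
theorem uniqueWordAmount_spec : Claim_equal_uniqueWordAmount := by
  intro words _
  unfold Spec_uniqueWordAmount uniqueWordAmount uniqueWordAmount_alt
  simp only []
  set L := words.map PySem.Str.lower with hL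
  set S := PySem.List.sorted L (fun x => x) false with hS
  have hSperm : S.Perm L := PySem.List.sorted_perm L (fun x => x) false
  have hSpair : S.Pairwise (· ≤ ·) := PySem.List.sorted_pairwise L (fun x => x)
  -- B's value
  have hB : (if (S.foldl stepB ([], none, 0)).2.2 = 1
      then (S.foldl stepB ([], none, 0)).1 ++ [(S.foldl stepB ([], none, 0)).2.1.getD ""]
      else (S.foldl stepB ([], none, 0)).1)
      = S.filter (fun x => S.count x == 1) := scan_top S hSpair
  -- A's value before sorting
  have hA : (words.foldl stepA ([], [])).1
      = (PySem.Set.ofList L).filter (fun x => L.count x == 1) := by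
    rw [foldl_stepA_map, ← hL]
    have := A_inv L [] [] [] (by simp) (by simp)
    simpa using this
  set uf := (PySem.Set.ofList L).filter (fun x => L.count x == 1) with huf
  set ys := S.filter (fun x => S.count x == 1) with hys
  -- the sorted unique list is exactly B's scan output
  have hufN : uf.Nodup := (PySem.Set.nodup_ofList L).filter _
  have hmemys : ∀ x, x ∈ ys ↔ x ∈ L ∧ L.count x = 1 := by
    intro x
    simp only [hys, List.mem_filter, beq_iff_eq, hSperm.mem_iff, hSperm.count_eq]
  have hysN : ys.Nodup := by
    rw [List.nodup_iff_count_le_one]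
    intro a
    by_cases hp : S.count a = 1
    · have h1 : List.count a (List.filter (fun x => S.count x == 1) S) = List.count a S :=
        List.count_filter (p := fun x => S.count x == 1) (by simpa using hp)
      calc List.count a ys = List.count a S := h1
        _ ≤ 1 := Nat.le_of_eq hp
    · have : a ∉ ys := by
        intro hmem
        exact hp (by simpa using (List.of_mem_filter (p := fun x => S.count x == 1) hmem))
      simp [List.count_eq_zero_of_not_mem this]
  have hperm : ys.Perm uf := by
    refine (List.perm_ext_iff_of_nodup hysN hufN).mpr ?_
    intro a
    rw [hmemys]
    simp [huf, List.mem_filter, PySem.Set.mem_ofList]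
  have hlt : ys.Pairwise (fun a b => a < b) := by
    have h1 : ys.Pairwise (· ≤ ·) := hSpair.filter _
    exact (h1.and hysN).imp (fun h => lt_of_le_of_ne h.1 h.2)
  rw [hA, hB]
  exact PySem.List.sorted_eq_of_perm_of_pairwise_lt uf ys (fun x => x) hperm hlt
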